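-- pv_equiv track=rewrite | github.com/chaeminsoo/coding_test | defense_game.py | solution
-- ===== SOURCE A (Python) =====
-- import heapq
--
-- def solution(n, k, enemy):
--     use_k = []
--     damage = 0
--     ans = 0
--     for i in enemy:
--         heapq.heappush(use_k,i)
--         if len(use_k) > k:
--             d = heapq.heappop(use_k)
--             damage+=d
--             if damage > n:
--                 break
--         ans+=1
--     return ans
-- ===== SOURCE B (Python) =====
-- def solution(n, k, enemy):
--     covered = []
--     damage = 0
--     ans = 0
--     for e in enemy:
--         covered.append(e)
--         if len(covered) > k:
--             m = min(covered)
--             covered.remove(m)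
--             damage += m
--             if damage > n:
--                 break
--         ans += 1
--     return ans
-- ===== Notes on version B (the rewrite author's own statement) =====
-- stated objective: simpler
-- what changed: Replaces the heapq size-k min-heap with a plain list: append each wave, and when the list exceeds k scan for the minimum and remove that one element; no heap structure or heapq import is needed.
import Mathlib
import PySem

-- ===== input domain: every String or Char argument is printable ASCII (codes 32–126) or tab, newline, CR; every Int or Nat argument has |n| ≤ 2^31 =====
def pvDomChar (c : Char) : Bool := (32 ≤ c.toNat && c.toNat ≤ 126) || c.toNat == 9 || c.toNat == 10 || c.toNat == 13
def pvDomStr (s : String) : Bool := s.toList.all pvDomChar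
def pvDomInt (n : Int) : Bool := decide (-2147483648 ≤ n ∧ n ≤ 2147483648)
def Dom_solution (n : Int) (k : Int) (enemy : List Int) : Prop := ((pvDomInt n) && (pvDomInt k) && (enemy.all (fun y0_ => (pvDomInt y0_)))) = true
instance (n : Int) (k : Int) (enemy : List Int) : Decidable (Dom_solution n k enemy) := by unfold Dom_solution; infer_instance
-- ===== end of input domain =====

-- B replaces the heapq min-heap with a plain list plus a min-scan removal; same return value, no speed claim.
-- ===== PORT A =====
-- heapq is ported by its priority-queue contract: the heap is kept as a sorted list,
-- heappush = ordered insert, heappop = take the head (the minimum).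
def heappush (h : List Int) (x : Int) : List Int :=
  match h with
  | [] => [x]
  | y :: ys => if x ≤ y then x :: y :: ys else y :: heappush ys x

def solutionGo (n : Int) (k : Int) : List Int → List Int → Int → Int → Int
  | [], _, _, ans => ans
  | i :: rest, use_k, damage, ans =>
    let h := heappush use_k i
    if (h.length : Int) > k then
      match h with
      | [] => ans  -- unreachable: h was just pushed to
      | d :: h' =>
        if damage + d > n then ans
        else solutionGo n k rest h' (damage + d) (ans + 1)
    else solutionGo n k rest h damage (ans + 1)

def solution (n : Int) (k : Int) (enemy : List Int) : Int :=
  solutionGo n k enemy [] 0 0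

-- ===== PORT B =====
def solutionAltGo (n : Int) (k : Int) : List Int → List Int → Int → Int → Int
  | [], _, _, ans => ans
  | e :: rest, covered, damage, ans =>
    let c := covered ++ [e]
    if (c.length : Int) > k then
      match PySem.List.min? c (fun x => x) with
      | none => ans  -- unreachable: c is nonempty
      | some m =>
        let c' := (PySem.List.remove? c m).getD c
        if damage + m > n then ans
        else solutionAltGo n k rest c' (damage + m) (ans + 1)
    else solutionAltGo n k rest c damage (ans + 1)

def solution_alt (n : Int) (k : Int) (enemy : List Int) : Int :=
  solutionAltGo n k enemy [] 0 0

-- ===== PRECONDITION & SPEC =====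
def Spec_solution (n : Int) (k : Int) (enemy : List Int) (out : Int) : Prop := out = solution_alt n k enemy
instance (n : Int) (k : Int) (enemy : List Int) (out : Int) : Decidable (Spec_solution n k enemy out) := by unfold Spec_solution; infer_instance

-- ===== CLAIM (what is proved, stated in full; the proofs are below) =====
def Claim_equal_solution : Prop := ∀ (n : Int) (k : Int) (enemy : List Int), Dom_solution n k enemy → Spec_solution n k enemy (solution n k enemy)

-- ===== LEMMAS AND PROOFS =====

-- ===== VERDICT (by name: the statement is the Claim_ definition above) =====
lemma heappush_perm (h : List Int) (x : Int) : (heappush h x).Perm (x :: h) := by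
  induction h with
  | nil => simp [heappush]
  | cons y ys ih =>
    simp only [heappush]
    split
    · exact List.Perm.refl _
    · exact (ih.cons y).trans (List.Perm.swap x y ys)

lemma heappush_sorted (h : List Int) (x : Int) (hs : h.Pairwise (· ≤ ·)) :
    (heappush h x).Pairwise (· ≤ ·) := by
  induction h with
  | nil => simp [heappush]
  | cons y ys ih =>
    simp only [heappush]
    rcases List.pairwise_cons.mp hs with ⟨hy, hys⟩
    split
    · rename_i hxy
      refine List.pairwise_cons.mpr ⟨?_, hs⟩
      intro z hz
      rcases List.mem_cons.mp hz with rfl | hz'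
      · exact hxy
      · exact le_trans hxy (hy _ hz')
    · rename_i hxy
      refine List.pairwise_cons.mpr ⟨?_, ih hys⟩
      intro z hz
      rcases List.mem_cons.mp ((heappush_perm ys x).mem_iff.mp hz) with rfl | hz'
      · omega
      · exact hy _ hz'

lemma go_eq (n k : Int) (enemy : List Int) :
    ∀ (a b : List Int) (damage ans : Int),
    a.Pairwise (· ≤ ·) → a.Perm b →
    solutionGo n k enemy a damage ans = solutionAltGo n k enemy b damage ans := by
  induction enemy with
  | nil => intros; rfl
  | cons i rest ih =>
    intro a b damage ans hs hp
    simp only [solutionGo, solutionAltGo]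
    have hperm : (heappush a i).Perm (b ++ [i]) :=
      (heappush_perm a i).trans ((hp.cons i).trans (List.perm_append_singleton i b).symm)
    have hlen : (heappush a i).length = (b ++ [i]).length := hperm.length_eq
    have hsort : (heappush a i).Pairwise (· ≤ ·) := heappush_sorted a i hs
    rw [hlen]
    split
    · -- length > k : pop the minimum
      cases hh : heappush a i with
      | nil => exact absurd (hh ▸ hperm).length_eq (by simp)
      | cons d h' =>
        have hperm2 : (d :: h').Perm (b ++ [i]) := hh ▸ hperm
        have hsort2 : (d :: h').Pairwise (· ≤ ·) := hh ▸ hsort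
        have hdmem : d ∈ b ++ [i] := hperm2.subset (List.mem_cons_self ..)
        have hdmin : ∀ y ∈ b ++ [i], d ≤ y := by
          intro y hy
          rcases List.mem_cons.mp (hperm2.symm.mem_iff.mp hy) with rfl | hy'
          · exact le_refl _
          · exact (List.pairwise_cons.mp hsort2).1 _ hy'
        cases hm : PySem.List.min? (b ++ [i]) (fun x => x) with
        | none =>
          exact absurd ((PySem.List.min?_eq_none_iff _ _).mp hm) (by simp)
        | some m =>
          dsimp only
          have hmmem : m ∈ b ++ [i] := PySem.List.min?_mem hm
          have hmmin : m ≤ d := PySem.List.min?_isMin hm d hdmem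
          have hdm : d = m := le_antisymm (hdmin m hmmem) hmmin
          subst hdm
          rw [PySem.List.remove?_eq_some_erase _ _ hdmem]
          simp only [Option.getD_some]
          have hperm3 : h'.Perm ((b ++ [i]).erase d) := by
            have := hperm2.erase d
            simpa using this
          split
          · rfl
          · exact ih h' _ _ _ (List.pairwise_cons.mp hsort2).2 hperm3
    · exact ih _ _ _ _ hsort hperm

-- ===== VERDICT (by name: the statement is the Claim_ definition above) =====
theorem solution_spec : Claim_equal_solution := by
  intro n k enemy _
  unfold Spec_solution solution solution_alt
  exact go_eq n k enemy [] [] 0 0 (by simp) (List.Perm.refl _)
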